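-- pv_equiv track=rewrite | github.com/Pawo0/WDI | kolosyRek/21.22.zad3.py | l_tower
-- ===== SOURCE A (Python) =====
-- def relatively_prime(x,y):
--     if nwd(x,y) == 1:
--         return True
--     return False
--
-- def nwd(a,b):
--     if b == 0:
--         return a
--     return nwd(b,a%b)
--
-- def l_tower(t,w=0,k=0,mv=0):
--     n = len(t)
--     if w == k == n-1:
--         return mv
--     for i in range(k+1,n):
--         if relatively_prime(t[w][k],t[w][i]):
--             return l_tower(t,w,i,mv+1)
--     for i in range(w+1,n):
--         if relatively_prime(t[w][k], t[i][k]):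
--             return l_tower(t,i,k,mv+1)
--     return -1
-- ===== SOURCE B (Python) =====
-- def _gcd(a, b):
--     while b:
--         a, b = b, a % b
--     return a
--
-- def l_tower(t, w=0, k=0, mv=0):
--     n = len(t)
--     while not (w == k == n - 1):
--         i = k + 1
--         while i < n and _gcd(t[w][k], t[w][i]) != 1:
--             i += 1
--         if i < n:
--             k = i
--         else:
--             i = w + 1
--             while i < n and _gcd(t[w][k], t[i][k]) != 1:
--                 i += 1
--             if i >= n:
--                 return -1
--             w = i
--         mv += 1
--     return mv
-- ===== Notes on version B (the rewrite author's own statement) =====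
-- stated objective: alternative
-- what changed: Replaced A's recursive traversal (recursive l_tower calls, for-loops over range, recursive nwd/relatively_prime helpers) by a single iterative while-loop that mutates the state (w, k, mv) in place, with inline while-scans for the next relatively-prime cell and an iterative Euclid gcd.
-- outside the precondition, e.g. on l_tower([[2, 4], [4]], 0, 0, 0): A returns -1, B returns -1; on l_tower([[1, 2, 3], [4, 5, 6]], 0, 2, 0): A returns -1, B returns -1
import Mathlib
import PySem

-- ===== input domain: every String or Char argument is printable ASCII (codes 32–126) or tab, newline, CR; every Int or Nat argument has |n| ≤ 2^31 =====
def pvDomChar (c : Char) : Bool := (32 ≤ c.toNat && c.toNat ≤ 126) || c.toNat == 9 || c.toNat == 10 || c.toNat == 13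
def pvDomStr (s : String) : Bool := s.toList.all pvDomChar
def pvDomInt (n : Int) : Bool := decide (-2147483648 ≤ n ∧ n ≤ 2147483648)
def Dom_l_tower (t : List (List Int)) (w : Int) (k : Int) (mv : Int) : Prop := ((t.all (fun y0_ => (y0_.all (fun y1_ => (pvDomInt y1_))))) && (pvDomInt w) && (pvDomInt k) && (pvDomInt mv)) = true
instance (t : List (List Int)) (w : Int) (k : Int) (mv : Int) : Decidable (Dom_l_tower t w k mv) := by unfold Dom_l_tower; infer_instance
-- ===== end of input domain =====

-- B rewrites the recursive traversal as an iterative while-loop over mutable (w, k, mv) with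
-- inline linear scans and an iterative gcd (objective: alternative decomposition, same cost).
-- All recursions below carry a Nat fuel argument as a totality guard only: each fuel bound
-- strictly exceeds the number of steps the Python loop/recursion can take, so the 0 case is
-- never reached on any input.

-- ===== PORT A =====
-- def nwd(a,b): recursive Euclid with Python %.  |a % b| < |b|, so |b|+1 steps always suffice.
def pvNwdF : Nat → Int → Int → Int
  | 0, a, _ => a
  | fuel + 1, a, b => if b = 0 then a else pvNwdF fuel b (PySem.Int.mod a b)

def pvNwd (a b : Int) : Int := pvNwdF (b.natAbs + 1) a b

-- def relatively_prime(x,y)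
def pvRelPrime (x y : Int) : Bool :=
  if pvNwd x y = 1 then true else false

-- body of l_tower; every recursive call strictly decreases (n-w)+(n-k), whence the fuel bound
def l_towerF (t : List (List Int)) : Nat → Int → Int → Int → Int
  | 0, _, _, _ => -1
  | fuel + 1, w, k, mv =>
    let n : Int := PySem.List.len t
    if w = k ∧ k = n - 1 then mv
    else
      -- for i in range(k+1, n): if relatively_prime(t[w][k], t[w][i]): return l_tower(t, w, i, mv+1)
      match (PySem.List.pyRange (k + 1) n 1).find? (fun i =>
          pvRelPrime (PySem.List.pyGetD (PySem.List.pyGetD t w []) k 0)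
                     (PySem.List.pyGetD (PySem.List.pyGetD t w []) i 0)) with
      | some i => l_towerF t fuel w i (mv + 1)
      | none =>
        -- for i in range(w+1, n): if relatively_prime(t[w][k], t[i][k]): return l_tower(t, i, k, mv+1)
        match (PySem.List.pyRange (w + 1) n 1).find? (fun i =>
            pvRelPrime (PySem.List.pyGetD (PySem.List.pyGetD t w []) k 0)
                       (PySem.List.pyGetD (PySem.List.pyGetD t i []) k 0)) with
        | some i => l_towerF t fuel i k (mv + 1)
        | none => -1

def l_tower (t : List (List Int)) (w : Int) (k : Int) (mv : Int) : Int :=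
  l_towerF t ((PySem.List.len t - w).toNat + (PySem.List.len t - k).toNat + 1) w k mv

-- ===== PORT B =====
-- def _gcd(a, b): while b: a, b = b, a % b; return a
def pvGcdF : Nat → Int → Int → Int
  | 0, a, _ => a
  | fuel + 1, a, b => if b ≠ 0 then pvGcdF fuel b (PySem.Int.mod a b) else a

def pvGcd (a b : Int) : Int := pvGcdF (b.natAbs + 1) a b

-- 'i = start; while i < n and not p(i): i += 1' — returns the final i ((n-start) steps suffice)
def pvScanF (n : Int) (p : Int → Bool) : Nat → Int → Int
  | 0, i => i
  | fuel + 1, i => if i < n then (if p i then i else pvScanF n p fuel (i + 1)) else i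

def pvScan (n : Int) (p : Int → Bool) (i : Int) : Int := pvScanF n p (n - i).toNat i

-- the while-loop body of B over the mutated state (w, k, mv);
-- Source B's local 'pivot' (= t[w][k]) is written out inline
def pvLoopF (t : List (List Int)) (n : Int) : Nat → Int → Int → Int → Int
  | 0, _, _, _ => -1
  | fuel + 1, w, k, mv =>
    if w = k ∧ k = n - 1 then mv
    else
      if pvScan n (fun i =>
          decide (pvGcd (PySem.List.pyGetD (PySem.List.pyGetD t w []) k 0)
            (PySem.List.pyGetD (PySem.List.pyGetD t w []) i 0) = 1)) (k + 1) < n then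
        pvLoopF t n fuel w (pvScan n (fun i =>
          decide (pvGcd (PySem.List.pyGetD (PySem.List.pyGetD t w []) k 0)
            (PySem.List.pyGetD (PySem.List.pyGetD t w []) i 0) = 1)) (k + 1)) (mv + 1)
      else
        if pvScan n (fun j =>
            decide (pvGcd (PySem.List.pyGetD (PySem.List.pyGetD t w []) k 0)
              (PySem.List.pyGetD (PySem.List.pyGetD t j []) k 0) = 1)) (w + 1) < n then
          pvLoopF t n fuel (pvScan n (fun j =>
            decide (pvGcd (PySem.List.pyGetD (PySem.List.pyGetD t w []) k 0)
              (PySem.List.pyGetD (PySem.List.pyGetD t j []) k 0) = 1)) (w + 1)) k (mv + 1)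
        else -1

def l_tower_alt (t : List (List Int)) (w : Int) (k : Int) (mv : Int) : Int :=
  pvLoopF t (PySem.List.len t)
    ((PySem.List.len t - w).toNat + (PySem.List.len t - k).toNat + 1) w k mv

-- ===== PRECONDITION & SPEC =====
-- Pre_ admits the inputs on which the traversal can never index out of range: either (w,k) is a
-- cell of a table with n >= 1 rows of length >= n (Python-style negative coordinates included),
-- so every access t[w][k], t[w][i], t[i][k] with i < n is in range, or both coordinates are past
-- the last row/column, so nothing is ever indexed.  Outside Pre_ both Pythons raise IndexError,
-- except on some ragged tables whose particular traversal happens to stay in range; A returns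
-- there and B returns the same value (see the cites).
def Pre_l_tower (t : List (List Int)) (w : Int) (k : Int) (mv : Int) : Prop :=
  (1 ≤ PySem.List.len t ∧
   -PySem.List.len t ≤ w ∧ w < PySem.List.len t ∧
   -PySem.List.len t ≤ k ∧ k < PySem.List.len t ∧
   ∀ row ∈ t, PySem.List.len t ≤ PySem.List.len row) ∨
  (PySem.List.len t - 1 ≤ w ∧ PySem.List.len t - 1 ≤ k)
instance (t : List (List Int)) (w : Int) (k : Int) (mv : Int) : Decidable (Pre_l_tower t w k mv) := by
  unfold Pre_l_tower; infer_instance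

def pvWitness_l_tower : List (List Int) × Int × Int × Int := ([[1, 2], [3, 4]], 0, 0, 0)

def Spec_l_tower (t : List (List Int)) (w : Int) (k : Int) (mv : Int) (out : Int) : Prop := out = l_tower_alt t w k mv
instance (t : List (List Int)) (w : Int) (k : Int) (mv : Int) (out : Int) : Decidable (Spec_l_tower t w k mv out) := by unfold Spec_l_tower; infer_instance

-- ===== CLAIM (what is proved, stated in full; the proofs are below) =====
def Claim_equal_l_tower : Prop := ∀ (t : List (List Int)) (w : Int) (k : Int) (mv : Int), Dom_l_tower t w k mv → Pre_l_tower t w k mv → Spec_l_tower t w k mv (l_tower t w k mv)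

-- ===== LEMMAS AND PROOFS =====

-- B's iterative gcd is A's recursive nwd (the two fueled recursions are step-for-step identical)
theorem pvGcdF_eq_pvNwdF (fuel : Nat) : ∀ (a b : Int), pvGcdF fuel a b = pvNwdF fuel a b := by
  induction fuel with
  | zero => intro a b; rfl
  | succ f ih =>
    intro a b
    by_cases h : b = 0 <;> simp [pvGcdF, pvNwdF, ih, h]

theorem pvRelPrime_eq (x y : Int) : pvRelPrime x y = decide (pvGcd x y = 1) := by
  unfold pvGcd
  rw [pvGcdF_eq_pvNwdF]
  simp [pvRelPrime, pvNwd]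

theorem pvScan_stop (n : Int) (p : Int → Bool) (a : Int) (h : ¬ a < n) : pvScan n p a = a := by
  unfold pvScan
  have h0 : (n - a).toNat = 0 := by omega
  rw [h0]
  rfl

theorem pvScan_unfold (n : Int) (p : Int → Bool) (a : Int) (h : a < n) :
    pvScan n p a = if p a then a else pvScan n p (a + 1) := by
  unfold pvScan
  have hm : (n - a).toNat = (n - (a + 1)).toNat + 1 := by omega
  rw [hm]
  simp [pvScanF, h]

-- A's for-loop first hit equals B's while-scan result
theorem find?_eq_scan (n : Int) (p : Int → Bool) : ∀ (m : Nat) (a : Int), (n - a).toNat = m →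
    (PySem.List.pyRange a n 1).find? p =
      if pvScan n p a < n then some (pvScan n p a) else none := by
  intro m
  induction m with
  | zero =>
    intro a hm
    rw [PySem.List.pyRange_one_eq_nil (by omega), pvScan_stop n p a (by omega)]
    simp
    omega
  | succ f ih =>
    intro a hm
    have h : a < n := by omega
    rw [PySem.List.pyRange_one_cons h, pvScan_unfold n p a h]
    by_cases hp : p a
    · simp [hp, h]
    · simp only [List.find?_cons, hp, if_false, Bool.false_eq_true]
      exact ih (a + 1) (by omega)

-- the two fueled step functions agree at every fuel (each step is the same computation)
theorem l_towerF_eq_pvLoopF (t : List (List Int)) : ∀ (fuel : Nat) (w k mv : Int),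
    l_towerF t fuel w k mv = pvLoopF t (PySem.List.len t) fuel w k mv := by
  intro fuel
  induction fuel with
  | zero => intro w k mv; rfl
  | succ f ih =>
    intro w k mv
    rw [l_towerF, pvLoopF]
    by_cases hbase : w = k ∧ k = PySem.List.len t - 1
    · rw [if_pos hbase, if_pos hbase]
    · rw [if_neg hbase, if_neg hbase]
      have hpred1 : (fun i => pvRelPrime (PySem.List.pyGetD (PySem.List.pyGetD t w []) k 0)
          (PySem.List.pyGetD (PySem.List.pyGetD t w []) i 0)) =
          (fun i => decide (pvGcd (PySem.List.pyGetD (PySem.List.pyGetD t w []) k 0)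
            (PySem.List.pyGetD (PySem.List.pyGetD t w []) i 0) = 1)) := by
        funext i; exact pvRelPrime_eq _ _
      have hpred2 : (fun i => pvRelPrime (PySem.List.pyGetD (PySem.List.pyGetD t w []) k 0)
          (PySem.List.pyGetD (PySem.List.pyGetD t i []) k 0)) =
          (fun j => decide (pvGcd (PySem.List.pyGetD (PySem.List.pyGetD t w []) k 0)
            (PySem.List.pyGetD (PySem.List.pyGetD t j []) k 0) = 1)) := by
        funext i; exact pvRelPrime_eq _ _
      rw [hpred1, hpred2, find?_eq_scan _ _ _ _ rfl, find?_eq_scan _ _ _ _ rfl]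
      set n := PySem.List.len t with hn
      set p1 := (fun i => decide (pvGcd (PySem.List.pyGetD (PySem.List.pyGetD t w []) k 0)
            (PySem.List.pyGetD (PySem.List.pyGetD t w []) i 0) = 1)) with hp1
      set p2 := (fun j => decide (pvGcd (PySem.List.pyGetD (PySem.List.pyGetD t w []) k 0)
            (PySem.List.pyGetD (PySem.List.pyGetD t j []) k 0) = 1)) with hp2
      by_cases h1 : pvScan n p1 (k + 1) < n
      · rw [if_pos h1, if_pos h1]
        exact ih w (pvScan n p1 (k + 1)) (mv + 1)
      · rw [if_neg h1, if_neg h1]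
        by_cases h2 : pvScan n p2 (w + 1) < n
        · rw [if_pos h2, if_pos h2]
          exact ih (pvScan n p2 (w + 1)) k (mv + 1)
        · rw [if_neg h2, if_neg h2]

-- ===== VERDICT (by name: the statement is the Claim_ definition above) =====
theorem l_tower_spec : Claim_equal_l_tower := by
  intro t w k mv _ _
  unfold Spec_l_tower l_tower_alt l_tower
  exact l_towerF_eq_pvLoopF t _ w k mv
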